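-- pv_equiv track=rewrite | github.com/tufts-ml/categorical-from-binary | help.py | get_doc
-- ===== SOURCE A (Python) =====
-- def get_doc(lines):
--     doc = []
--     for line in reversed(lines):
--         if line.startswith("#"):
--             doc.append(line)
--         else:
--             break
--     doc = list(reversed(doc))
--     return "".join(doc).strip()
-- ===== SOURCE B (Python) =====
-- def get_doc(lines):
--     cut = 0
--     for i, line in enumerate(lines):
--         if not line.startswith("#"):
--             cut = i + 1
--     return "".join(lines[cut:]).strip()
-- ===== Notes on version B (the rewrite author's own statement) =====
-- stated objective: simpler
-- what changed: B does a single forward pass keeping a boundary index (last non-comment line + 1) and joins the tail slice, instead of accumulating a reversed list with an early break and reversing it back.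
import Mathlib
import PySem

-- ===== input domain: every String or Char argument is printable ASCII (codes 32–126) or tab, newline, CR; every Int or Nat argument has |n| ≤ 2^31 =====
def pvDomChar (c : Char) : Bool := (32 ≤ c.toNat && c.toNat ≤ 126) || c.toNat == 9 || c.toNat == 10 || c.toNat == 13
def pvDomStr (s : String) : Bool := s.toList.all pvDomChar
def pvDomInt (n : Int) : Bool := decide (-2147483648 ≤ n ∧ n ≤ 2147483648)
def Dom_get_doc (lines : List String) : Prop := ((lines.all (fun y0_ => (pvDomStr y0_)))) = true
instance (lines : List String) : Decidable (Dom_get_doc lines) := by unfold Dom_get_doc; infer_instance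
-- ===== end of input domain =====

-- B replaces A's reversed-accumulation-with-break by a single forward pass keeping a
-- boundary index and joining the tail slice (objective: simpler decomposition).

-- ===== PORT A =====
-- the 'for line in reversed(lines): … break' loop, with the growing doc accumulator
def getDocLoopA : List String → List String → List String
  | [], doc => doc
  | l :: rest, doc =>
      if PySem.Str.startswith l "#" then getDocLoopA rest (doc ++ [l]) else doc

def get_doc (lines : List String) : String :=
  PySem.Str.strip (PySem.Str.join "" ((getDocLoopA lines.reverse []).reverse))

-- ===== PORT B =====
-- the 'for i, line in enumerate(lines): if not line.startswith("#"): cut = i + 1' loop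
def cutVal (lines : List String) : Int :=
  (PySem.List.enumerate lines 0).foldl
    (fun cut p => if !(PySem.Str.startswith p.2 "#") then p.1 + 1 else cut) 0

-- return "".join(lines[cut:]).strip()
def get_doc_alt (lines : List String) : String :=
  PySem.Str.strip (PySem.Str.join "" (PySem.List.slice lines (some (cutVal lines)) none))

-- ===== PRECONDITION & SPEC =====
def Spec_get_doc (lines : List String) (out : String) : Prop := out = get_doc_alt lines
instance (lines : List String) (out : String) : Decidable (Spec_get_doc lines out) := by unfold Spec_get_doc; infer_instance

-- ===== CLAIM (what is proved, stated in full; the proofs are below) =====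
def Claim_equal_get_doc : Prop := ∀ (lines : List String), Dom_get_doc lines → Spec_get_doc lines (get_doc lines)

-- ===== LEMMAS AND PROOFS =====

-- A's loop appends exactly the leading '#'-prefixed run of its input
theorem getDocLoopA_eq (xs acc : List String) :
    getDocLoopA xs acc = acc ++ xs.takeWhile (fun l => PySem.Str.startswith l "#") := by
  induction xs generalizing acc with
  | nil => simp [getDocLoopA]
  | cons l rest ih =>
      by_cases h : PySem.Chars.startswith l.toList ['#'] = true <;>
        simp [getDocLoopA, ih, h]

theorem cutVal_concat (ys : List String) (y : String) :
    cutVal (ys ++ [y]) =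
      if PySem.Str.startswith y "#" then cutVal ys else (ys.length : Int) + 1 := by
  unfold cutVal
  rw [PySem.List.enumerate_append, List.foldl_append]
  by_cases h : PySem.Chars.startswith y.toList ['#'] = true <;>
    simp [PySem.List.enumerate, h]

theorem cutVal_bounds (lines : List String) :
    0 ≤ cutVal lines ∧ cutVal lines ≤ (lines.length : Int) := by
  induction lines using List.reverseRecOn with
  | nil => simp [cutVal, PySem.List.enumerate]
  | append_singleton ys y ih =>
      rw [cutVal_concat]
      split <;> simp <;> omega

-- B's tail slice is A's reversed trailing-comment run
theorem drop_cutVal (lines : List String) :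
    lines.drop (cutVal lines).toNat =
      ((lines.reverse.takeWhile (fun l => PySem.Str.startswith l "#")).reverse) := by
  induction lines using List.reverseRecOn with
  | nil => simp [cutVal, PySem.List.enumerate]
  | append_singleton ys y ih =>
      rw [cutVal_concat]
      by_cases h : PySem.Str.startswith y "#" = true
      · have hC : PySem.Chars.startswith y.toList ['#'] = true := by simpa using h
        have hb := cutVal_bounds ys
        have hle : (cutVal ys).toNat ≤ ys.length := by omega
        rw [if_pos h, List.drop_append_of_le_length hle, ih]
        simp [hC]
      · have hC : PySem.Chars.startswith y.toList ['#'] = false := by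
          simpa using h
        rw [if_neg h]
        have hn : ((ys.length : Int) + 1).toNat = ys.length + 1 := by omega
        rw [hn]
        simp [hC]

-- ===== VERDICT (by name: the statement is the Claim_ definition above) =====
theorem get_doc_spec : Claim_equal_get_doc := by
  intro lines _
  unfold Spec_get_doc get_doc get_doc_alt
  rw [PySem.List.slice_from lines (cutVal_bounds lines).1]
  rw [getDocLoopA_eq, drop_cutVal]
  simp
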